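-- pv_equiv track=rewrite | github.com/MatheusEduard/ProjetoMusica | MusicBoom/escala_diminuta.py | escala_diminuta
-- ===== SOURCE A (Python) =====
-- def escala_diminuta(nota):
--     notas = ['C','C#','D','D#','E','F','F#','G','G#','A','A#','B','C','C#','D','D#','E','F','F#','G','G#','A','A#','B','C','C#','D','D#','E','F','F#','G','G#','A','A#','B','C']
--     escala = []
--     for i in range(len(notas)-25):
--         if notas[i] == nota:
--             atual = notas[i]
--             escala.append(atual)
--             atual = notas[i+2]
--             escala.append(atual)
--             atual = notas[i+3]
--             escala.append(atual)
--             atual = notas[i+5]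
--             escala.append(atual)
--             atual = notas[i+6]
--             escala.append(atual)
--             atual = notas[i+8]
--             escala.append(atual)
--             atual = notas[i+9]
--             escala.append(atual)
--             atual = notas[i+11]
--             escala.append(atual)
--             atual = notas[i+12]
--             escala.append(atual)
--             atual = notas[i+14]
--             escala.append(atual)
--             atual = notas[i+15]
--             escala.append(atual)
--             atual = notas[i+17]
--             escala.append(atual)
--             atual = notas[i+18]
--             escala.append(atual)
--             atual = notas[i+20]
--             escala.append(atual)
--             atual = notas[i+21]
--             escala.append(atual)
--             atual = notas[i+23]
--             escala.append(atual)
--             atual = notas[i+24]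
--             escala.append(atual)
--     return escala
-- ===== SOURCE B (Python) =====
-- def escala_diminuta(nota):
--     chrom = ['C', 'C#', 'D', 'D#', 'E', 'F', 'F#', 'G', 'G#', 'A', 'A#', 'B']
--     if nota not in chrom:
--         return []
--     pos = chrom.index(nota)
--     escala = []
--     for k in range(17):
--         escala.append(chrom[pos % 12])
--         pos += 2 if k % 2 == 0 else 1
--     return escala
-- ===== Notes on version B (the rewrite author's own statement) =====
-- stated objective: simpler
-- what changed: Replaces A's 37-entry triplicated note table with 17 hardcoded unrolled offsets and a linear scan by a 12-note chromatic list, an index lookup, and a single 17-step loop that alternates whole/half steps mod 12.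
import Mathlib
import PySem

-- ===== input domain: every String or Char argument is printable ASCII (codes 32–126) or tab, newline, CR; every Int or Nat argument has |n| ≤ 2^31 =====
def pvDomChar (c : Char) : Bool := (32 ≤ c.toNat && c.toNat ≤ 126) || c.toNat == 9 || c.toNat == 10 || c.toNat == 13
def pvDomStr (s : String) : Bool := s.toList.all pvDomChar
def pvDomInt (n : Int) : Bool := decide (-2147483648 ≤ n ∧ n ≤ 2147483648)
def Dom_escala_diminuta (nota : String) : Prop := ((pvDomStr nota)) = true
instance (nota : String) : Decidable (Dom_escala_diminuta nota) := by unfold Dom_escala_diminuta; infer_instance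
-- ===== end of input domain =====

-- B replaces A's 37-entry triplicated table and 17 hardcoded offsets by a 12-note list
-- indexed mod 12 through a 17-step whole/half alternating loop (simpler decomposition).

-- ===== PORT A =====
-- all indices notas[i+k] are in range (i ≤ 11, k ≤ 24, length 37), so pyGetD "" is exact here
def escala_diminuta (nota : String) : List String :=
  let notas : List String := ["C","C#","D","D#","E","F","F#","G","G#","A","A#","B","C","C#","D","D#","E","F","F#","G","G#","A","A#","B","C","C#","D","D#","E","F","F#","G","G#","A","A#","B","C"]
  (PySem.List.pyRange 0 (PySem.List.len notas - 25) 1).foldl (fun escala i =>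
    if PySem.List.pyGetD notas i "" = nota then
      escala ++ [PySem.List.pyGetD notas i "", PySem.List.pyGetD notas (i+2) "",
        PySem.List.pyGetD notas (i+3) "", PySem.List.pyGetD notas (i+5) "",
        PySem.List.pyGetD notas (i+6) "", PySem.List.pyGetD notas (i+8) "",
        PySem.List.pyGetD notas (i+9) "", PySem.List.pyGetD notas (i+11) "",
        PySem.List.pyGetD notas (i+12) "", PySem.List.pyGetD notas (i+14) "",
        PySem.List.pyGetD notas (i+15) "", PySem.List.pyGetD notas (i+17) "",
        PySem.List.pyGetD notas (i+18) "", PySem.List.pyGetD notas (i+20) "",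
        PySem.List.pyGetD notas (i+21) "", PySem.List.pyGetD notas (i+23) "",
        PySem.List.pyGetD notas (i+24) ""]
    else escala) []

-- ===== PORT B =====
def escala_diminuta_alt (nota : String) : List String :=
  let chrom : List String := ["C","C#","D","D#","E","F","F#","G","G#","A","A#","B"]
  match PySem.List.index? chrom nota with
  | none => []
  | some idx =>
      ((PySem.List.pyRange 0 17 1).foldl (fun (st : List String × Int) k =>
          (st.1 ++ [PySem.List.pyGetD chrom (PySem.Int.mod st.2 12) ""],
           st.2 + (if PySem.Int.mod k 2 = 0 then 2 else 1)))
        ([], (idx : Int))).1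

-- ===== PRECONDITION & SPEC =====
def Spec_escala_diminuta (nota : String) (out : List String) : Prop := out = escala_diminuta_alt nota
instance (nota : String) (out : List String) : Decidable (Spec_escala_diminuta nota out) := by unfold Spec_escala_diminuta; infer_instance

-- ===== CLAIM =====
def Claim_equal_escala_diminuta : Prop := ∀ (nota : String), Dom_escala_diminuta nota → Spec_escala_diminuta nota (escala_diminuta nota)

-- ===== LEMMAS AND PROOFS =====

-- ===== VERDICT =====
set_option maxHeartbeats 1000000 in
theorem escala_diminuta_spec : Claim_equal_escala_diminuta := by
  intro nota _
  unfold Spec_escala_diminuta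
  by_cases h1 : nota = "C"; · subst h1; decide
  by_cases h2 : nota = "C#"; · subst h2; decide
  by_cases h3 : nota = "D"; · subst h3; decide
  by_cases h4 : nota = "D#"; · subst h4; decide
  by_cases h5 : nota = "E"; · subst h5; decide
  by_cases h6 : nota = "F"; · subst h6; decide
  by_cases h7 : nota = "F#"; · subst h7; decide
  by_cases h8 : nota = "G"; · subst h8; decide
  by_cases h9 : nota = "G#"; · subst h9; decide
  by_cases h10 : nota = "A"; · subst h10; decide
  by_cases h11 : nota = "A#"; · subst h11; decide
  by_cases h12 : nota = "B"; · subst h12; decide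
  have hB : escala_diminuta_alt nota = [] := by
    have hidx : PySem.List.index? ["C","C#","D","D#","E","F","F#","G","G#","A","A#","B"] nota = none := by
      rw [PySem.List.index?_eq_none_iff]
      simp [h1, h2, h3, h4, h5, h6, h7, h8, h9, h10, h11, h12]
    simp only [escala_diminuta_alt, hidx]
  rw [hB]
  simp only [escala_diminuta]
  refine Eq.trans (PySem.List.foldl_congr_mem _ _ (fun acc _ => acc) _ ?_)
    (List.foldl_fixed' (fun _ => rfl) _)
  intro acc i hi
  rw [PySem.List.mem_pyRange_one] at hi
  simp only [PySem.List.len_eq, List.length_cons, List.length_nil] at hi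
  have hm : PySem.List.pyGetD
        ["C","C#","D","D#","E","F","F#","G","G#","A","A#","B","C","C#","D","D#","E","F","F#","G","G#","A","A#","B","C","C#","D","D#","E","F","F#","G","G#","A","A#","B","C"]
        i "" ∈ ["C","C#","D","D#","E","F","F#","G","G#","A","A#","B","C","C#","D","D#","E","F","F#","G","G#","A","A#","B","C","C#","D","D#","E","F","F#","G","G#","A","A#","B","C"] :=
    PySem.List.pyGetD_mem _ "" (by constructor <;> simp <;> omega)
  rw [if_neg]
  intro hc
  rw [hc] at hm
  simp at hm
  tauto
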